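-- pv_equiv track=rewrite | github.com/Goda-Emad/RIVA-Offline-AI-Driven-Health-Systems-Resilience | ai-core/local-inference/prescription_gen.py | _clinical_warnings
-- ===== SOURCE A (Python) =====
-- def _clinical_warnings(
--     med_names: list[str], profile: dict
-- ) -> list[str]:
--     """Extra warnings based on patient clinical profile."""
--     warnings = []
--     names_lower = {n.lower() for n in med_names}
--
--     if profile.get("is_pregnant"):
--         nsaids = {"ibuprofen", "diclofenac", "aspirin", "naproxen"}
--         found  = nsaids & names_lower
--         if found:
--             warnings.append(
--                 f"⚠️ تحذير للحامل: {', '.join(found)} — استشيري الطبيب قبل الاستخدام"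
--             )
--
--     if profile.get("has_diabetes"):
--         steroids = {"cortisone", "dexamethasone", "prednisolone"}
--         found    = steroids & names_lower
--         if found:
--             warnings.append(
--                 f"⚠️ تحذير لمريض السكر: {', '.join(found)} قد ترفع السكر — راقب المستوى"
--             )
--
--     if profile.get("has_kidney_disease"):
--         nephrotoxic = {"ibuprofen", "naproxen", "gentamicin"}
--         found       = nephrotoxic & names_lower
--         if found:
--             warnings.append(
--                 f"⚠️ تحذير لمريض الكلى: {', '.join(found)} — قد تضر الكلى"
--             )
--
--     return warnings
-- ===== SOURCE B (Python) =====
-- # Inverted index: classifies each medication in ONE pass via a drug->rules map,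
-- # instead of A's three per-rule set intersections over the whole name set.
-- _DRUG_INDEX = {
--     "ibuprofen": (0, 2), "diclofenac": (0,), "aspirin": (0,), "naproxen": (0, 2),
--     "cortisone": (1,), "dexamethasone": (1,), "prednisolone": (1,), "gentamicin": (2,),
-- }
-- _FLAGS = ("is_pregnant", "has_diabetes", "has_kidney_disease")
-- _WRAP = (
--     ("\u26a0\ufe0f تحذير للحامل: ", " — استشيري الطبيب قبل الاستخدام"),
--     ("\u26a0\ufe0f تحذير لمريض السكر: ", " قد ترفع السكر — راقب المستوى"),
--     ("\u26a0\ufe0f تحذير لمريض الكلى: ", " — قد تضر الكلى"),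
-- )
--
--
-- def _clinical_warnings(
--     med_names: list[str], profile: dict
-- ) -> list[str]:
--     """Extra warnings based on patient clinical profile (inverted-index version)."""
--     found = ([], [], [])
--     for n in med_names:
--         low = n.lower()
--         for i in _DRUG_INDEX.get(low, ()):
--             if low not in found[i]:
--                 found[i].append(low)
--     return [
--         pre + ", ".join(found[i]) + suf
--         for i, (pre, suf) in enumerate(_WRAP)
--         if profile.get(_FLAGS[i]) and found[i]
--     ]
-- ===== Notes on version B (the rewrite author's own statement) =====
-- stated objective: alternative
-- what changed: B inverts the data flow: instead of A's three per-rule set intersections against the full lowered-name set, B makes one pass over med_names, classifying each lowered name through an inverted drug-to-rules index into per-rule accumulator lists, then emits the warnings from those accumulators.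
import Mathlib
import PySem

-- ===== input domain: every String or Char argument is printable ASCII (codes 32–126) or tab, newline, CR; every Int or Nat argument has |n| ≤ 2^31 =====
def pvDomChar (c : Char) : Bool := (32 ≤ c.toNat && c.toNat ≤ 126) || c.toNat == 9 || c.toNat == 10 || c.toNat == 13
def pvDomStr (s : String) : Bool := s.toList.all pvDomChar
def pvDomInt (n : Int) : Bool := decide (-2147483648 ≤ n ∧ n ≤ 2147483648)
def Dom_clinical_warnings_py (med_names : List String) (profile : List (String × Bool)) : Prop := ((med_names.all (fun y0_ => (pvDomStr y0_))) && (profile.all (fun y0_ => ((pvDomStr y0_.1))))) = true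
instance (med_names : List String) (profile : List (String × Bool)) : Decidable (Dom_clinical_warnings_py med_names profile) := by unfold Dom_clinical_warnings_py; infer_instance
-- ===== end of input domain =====

-- B inverts the data flow: one pass over med_names through an inverted drug→rules index filling
-- per-rule accumulators, instead of A's three set intersections (objective: alternative).
-- profile.get(flag): first-match lookup in the association list (the task's dict convention), default falsy.
def pvGetFlag (profile : List (String × Bool)) (k : String) : Bool :=
  match profile.find? (fun kv => kv.1 == k) with
  | some kv => kv.2
  | none => false

-- ===== PORT A =====
def clinical_warnings_py (med_names : List String) (profile : List (String × Bool)) : List String :=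
  let names_lower : PySem.Set String := PySem.Set.ofList (med_names.map PySem.Str.lower)
  let warnings : List String := []
  let warnings :=
    if pvGetFlag profile "is_pregnant" then
      let nsaids : PySem.Set String := PySem.Set.ofList ["ibuprofen", "diclofenac", "aspirin", "naproxen"]
      let found := PySem.Set.inter nsaids names_lower
      if found ≠ [] then
        warnings ++ ["⚠️ تحذير للحامل: " ++ PySem.Str.join ", " found ++ " — استشيري الطبيب قبل الاستخدام"]
      else warnings
    else warnings
  let warnings :=
    if pvGetFlag profile "has_diabetes" then
      let steroids : PySem.Set String := PySem.Set.ofList ["cortisone", "dexamethasone", "prednisolone"]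
      let found := PySem.Set.inter steroids names_lower
      if found ≠ [] then
        warnings ++ ["⚠️ تحذير لمريض السكر: " ++ PySem.Str.join ", " found ++ " قد ترفع السكر — راقب المستوى"]
      else warnings
    else warnings
  let warnings :=
    if pvGetFlag profile "has_kidney_disease" then
      let nephrotoxic : PySem.Set String := PySem.Set.ofList ["ibuprofen", "naproxen", "gentamicin"]
      let found := PySem.Set.inter nephrotoxic names_lower
      if found ≠ [] then
        warnings ++ ["⚠️ تحذير لمريض الكلى: " ++ PySem.Str.join ", " found ++ " — قد تضر الكلى"]
      else warnings
    else warnings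
  warnings

-- ===== PORT B =====
-- the constant tables of Source B
def pvDrugIndex : PySem.Dict String (List Int) :=
  PySem.Dict.mk [("ibuprofen", [0, 2]), ("diclofenac", [0]), ("aspirin", [0]), ("naproxen", [0, 2]),
                 ("cortisone", [1]), ("dexamethasone", [1]), ("prednisolone", [1]), ("gentamicin", [2])]
def pvFlags : List String := ["is_pregnant", "has_diabetes", "has_kidney_disease"]
def pvWrap : List (String × String) :=
  [("⚠️ تحذير للحامل: ", " — استشيري الطبيب قبل الاستخدام"),
   ("⚠️ تحذير لمريض السكر: ", " قد ترفع السكر — راقب المستوى"),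
   ("⚠️ تحذير لمريض الكلى: ", " — قد تضر الكلى")]

-- found[i]
def pvSel (f : List String × List String × List String) (i : Int) : List String :=
  if i = 0 then f.1 else if i = 1 then f.2.1 else f.2.2

-- the body of the 'for n in med_names' loop: classify one name into the accumulators
-- ('if low not in found[i]: found[i].append(low)' is exactly PySem.Set.add)
def pvStep (f : List String × List String × List String) (n : String) :
    List String × List String × List String :=
  let low := PySem.Str.lower n
  (pvDrugIndex.getD low []).foldl (fun f i =>
    if i = 0 then (PySem.Set.add f.1 low, f.2.1, f.2.2)
    else if i = 1 then (f.1, PySem.Set.add f.2.1 low, f.2.2)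
    else (f.1, f.2.1, PySem.Set.add f.2.2 low)) f

def clinical_warnings_py_alt (med_names : List String) (profile : List (String × Bool)) : List String :=
  let found := med_names.foldl pvStep ([], [], [])
  (PySem.List.enumerate pvWrap).filterMap (fun iw =>
    if pvGetFlag profile (PySem.List.pyGetD pvFlags iw.1 "") && !(pvSel found iw.1).isEmpty then
      some (iw.2.1 ++ PySem.Str.join ", " (pvSel found iw.1) ++ iw.2.2)
    else none)

-- ===== PRECONDITION & SPEC =====
-- Pre_ excludes inputs where an active rule matches two or more distinct drug names: there A's ', '.join
-- iterates a Python set, so the order of the names in the warning is hash-randomization-dependent (an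
-- accident of the hash seed, not a function of the input); with at most one match the join is order-free.
def Pre_clinical_warnings_py (med_names : List String) (profile : List (String × Bool)) : Prop :=
  (pvGetFlag profile "is_pregnant" = true →
    (PySem.Set.inter (PySem.Set.ofList ["ibuprofen", "diclofenac", "aspirin", "naproxen"]) (PySem.Set.ofList (med_names.map PySem.Str.lower))).length ≤ 1) ∧
  (pvGetFlag profile "has_diabetes" = true →
    (PySem.Set.inter (PySem.Set.ofList ["cortisone", "dexamethasone", "prednisolone"]) (PySem.Set.ofList (med_names.map PySem.Str.lower))).length ≤ 1) ∧
  (pvGetFlag profile "has_kidney_disease" = true →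
    (PySem.Set.inter (PySem.Set.ofList ["ibuprofen", "naproxen", "gentamicin"]) (PySem.Set.ofList (med_names.map PySem.Str.lower))).length ≤ 1)
instance (med_names : List String) (profile : List (String × Bool)) : Decidable (Pre_clinical_warnings_py med_names profile) := by unfold Pre_clinical_warnings_py; infer_instance

def pvWitness_clinical_warnings_py : List String × (List (String × Bool)) :=
  (["Ibuprofen"], [("is_pregnant", true), ("has_kidney_disease", true)])

def Spec_clinical_warnings_py (med_names : List String) (profile : List (String × Bool)) (out : List String) : Prop := out = clinical_warnings_py_alt med_names profile
instance (med_names : List String) (profile : List (String × Bool)) (out : List String) : Decidable (Spec_clinical_warnings_py med_names profile out) := by unfold Spec_clinical_warnings_py; infer_instance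

-- ===== CLAIM =====
def Claim_equal_clinical_warnings_py : Prop := ∀ (med_names : List String) (profile : List (String × Bool)), Dom_clinical_warnings_py med_names profile → Pre_clinical_warnings_py med_names profile → Spec_clinical_warnings_py med_names profile (clinical_warnings_py med_names profile)

-- ===== LEMMAS AND PROOFS =====

def pvDrugs (i : Int) : List String :=
  if i = 0 then ["ibuprofen", "diclofenac", "aspirin", "naproxen"]
  else if i = 1 then ["cortisone", "dexamethasone", "prednisolone"]
  else ["ibuprofen", "naproxen", "gentamicin"]

-- the dict lookup of Source B's inverted index, as an if-chain over its keys
lemma getD_index (k : String) : pvDrugIndex.getD k [] =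
  if "ibuprofen" = k then [0, 2] else if "diclofenac" = k then [0] else if "aspirin" = k then [0]
  else if "naproxen" = k then [0, 2] else if "cortisone" = k then [1] else if "dexamethasone" = k then [1]
  else if "prednisolone" = k then [1] else if "gentamicin" = k then [2] else [] := by
  simp only [pvDrugIndex, PySem.Dict.getD_eq_get?_getD, PySem.Dict.get?_mk_cons, beq_iff_eq]
  split_ifs <;> rfl

-- the effect of one classification step, rule by rule
lemma pvStep_sel (f : List String × List String × List String) (n : String) (i : Int) (hi : i = 0 ∨ i = 1 ∨ i = 2) :
    pvSel (pvStep f n) i =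
      if PySem.Str.lower n ∈ pvDrugs i then PySem.Set.add (pvSel f i) (PySem.Str.lower n)
      else pvSel f i := by
  unfold pvStep
  simp only []
  generalize hlow : PySem.Str.lower n = low
  clear hlow
  rw [getD_index]
  rcases hi with h|h|h <;> subst h <;> simp only [pvSel, pvDrugs] <;> norm_num <;>
    split_ifs <;> simp_all [eq_comm]

lemma fold_sel_mem (ms : List String) (f : List String × List String × List String) (i : Int) (hi : i = 0 ∨ i = 1 ∨ i = 2) (x : String) :
    x ∈ pvSel (ms.foldl pvStep f) i ↔ x ∈ pvSel f i ∨ (x ∈ ms.map PySem.Str.lower ∧ x ∈ pvDrugs i) := by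
  induction ms generalizing f with
  | nil => simp
  | cons n t ih =>
    simp only [List.foldl_cons, List.map_cons, List.mem_cons]
    rw [ih (pvStep f n), pvStep_sel f n i hi]
    by_cases hm : PySem.Str.lower n ∈ pvDrugs i
    · simp only [hm, if_pos, PySem.Set.mem_add]
      constructor
      · rintro ((h | h) | h)
        · exact Or.inl h
        · exact Or.inr ⟨Or.inl h, h ▸ hm⟩
        · exact Or.inr ⟨Or.inr h.1, h.2⟩
      · rintro (h | ⟨(h | h), hd⟩)
        · exact Or.inl (Or.inl h)
        · exact Or.inl (Or.inr h)
        · exact Or.inr ⟨h, hd⟩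
    · simp only [hm, if_neg, not_false_iff]
      constructor
      · rintro (h | h)
        · exact Or.inl h
        · exact Or.inr ⟨Or.inr h.1, h.2⟩
      · rintro (h | ⟨(h | h), hd⟩)
        · exact Or.inl h
        · exact absurd (h ▸ hd) hm
        · exact Or.inr ⟨h, hd⟩

lemma fold_sel_nodup (ms : List String) (f : List String × List String × List String) (i : Int) (hi : i = 0 ∨ i = 1 ∨ i = 2)
    (h : (pvSel f i).Nodup) : (pvSel (ms.foldl pvStep f) i).Nodup := by
  induction ms generalizing f with
  | nil => exact h
  | cons n t ih =>
    simp only [List.foldl_cons]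
    refine ih (pvStep f n) ?_
    rw [pvStep_sel f n i hi]
    split_ifs with hm
    · exact PySem.Set.nodup_add _ _ h
    · exact h

-- a length-≤-1 list equals any Nodup list with the same members
lemma eq_of_subsingleton {l₁ l₂ : List String} (hm : ∀ x, x ∈ l₁ ↔ x ∈ l₂)
    (h1 : l₁.length ≤ 1) (h2 : l₂.Nodup) : l₁ = l₂ := by
  match l₁, h1 with
  | [], _ =>
    refine (List.eq_nil_iff_forall_not_mem.mpr ?_).symm
    intro x hx
    exact (List.not_mem_nil (a := x)).elim ((hm x).mpr hx)
  | [a], _ =>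
    have ha : a ∈ l₂ := (hm a).mp (List.mem_singleton_self a)
    have hall : ∀ x ∈ l₂, x = a := fun x hx => List.mem_singleton.mp ((hm x).mpr hx)
    match l₂, ha, h2 with
    | b :: t, hb, hnd =>
      have hba : b = a := hall b (List.mem_cons_self)
      have ht : t = [] := by
        refine List.eq_nil_iff_forall_not_mem.mpr fun x hx => ?_
        have hxa : x = a := hall x (List.mem_cons_of_mem b hx)
        have : a ∈ t := hxa ▸ hx
        exact (List.nodup_cons.mp hnd).1 (hba ▸ this)
      simp [hba, ht]

lemma found_eq (ms : List String) (i : Int) (hi : i = 0 ∨ i = 1 ∨ i = 2)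
    (hlen : (PySem.Set.inter (PySem.Set.ofList (pvDrugs i)) (PySem.Set.ofList (ms.map PySem.Str.lower))).length ≤ 1) :
    PySem.Set.inter (PySem.Set.ofList (pvDrugs i)) (PySem.Set.ofList (ms.map PySem.Str.lower)) =
      pvSel (ms.foldl pvStep ([], [], [])) i := by
  apply eq_of_subsingleton _ hlen (fold_sel_nodup ms _ i hi (by rcases hi with h|h|h <;> subst h <;> simp [pvSel]))
  intro x
  rw [PySem.Set.mem_inter, PySem.Set.mem_ofList, PySem.Set.mem_ofList, fold_sel_mem ms _ i hi]
  constructor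
  · rintro ⟨hd, hn⟩; exact Or.inr ⟨hn, hd⟩
  · rintro (h | ⟨hn, hd⟩)
    · rcases hi with hh|hh|hh <;> subst hh <;> simp [pvSel] at h
    · exact ⟨hd, hn⟩

-- ===== VERDICT =====
set_option maxHeartbeats 1000000 in
theorem clinical_warnings_py_spec : Claim_equal_clinical_warnings_py := by
  intro med_names profile _ hpre
  obtain ⟨h0, h1, h2⟩ := hpre
  unfold Spec_clinical_warnings_py clinical_warnings_py clinical_warnings_py_alt
  simp only [pvWrap, PySem.List.enumerate, List.filterMap_cons, List.filterMap_nil]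
  norm_num [pvFlags, PySem.List.pyGetD]
  have hget : (["is_pregnant", "has_diabetes", "has_kidney_disease"] : List String)[Int.toNat 2] = "has_kidney_disease" := rfl
  rw [hget]
  have E0 : pvGetFlag profile "is_pregnant" = true →
      (PySem.Set.ofList ["ibuprofen", "diclofenac", "aspirin", "naproxen"]).inter
        (PySem.Set.ofList (List.map PySem.Str.lower med_names)) = pvSel (List.foldl pvStep ([], [], []) med_names) 0 :=
    fun hp => by simpa [pvDrugs] using found_eq med_names 0 (by norm_num) (by simpa [pvDrugs] using h0 hp)
  have E1 : pvGetFlag profile "has_diabetes" = true →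
      (PySem.Set.ofList ["cortisone", "dexamethasone", "prednisolone"]).inter
        (PySem.Set.ofList (List.map PySem.Str.lower med_names)) = pvSel (List.foldl pvStep ([], [], []) med_names) 1 :=
    fun hd => by simpa [pvDrugs] using found_eq med_names 1 (by norm_num) (by simpa [pvDrugs] using h1 hd)
  have E2 : pvGetFlag profile "has_kidney_disease" = true →
      (PySem.Set.ofList ["ibuprofen", "naproxen", "gentamicin"]).inter
        (PySem.Set.ofList (List.map PySem.Str.lower med_names)) = pvSel (List.foldl pvStep ([], [], []) med_names) 2 :=
    fun hk => by simpa [pvDrugs] using found_eq med_names 2 (by norm_num) (by simpa [pvDrugs] using h2 hk)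
  by_cases hp : pvGetFlag profile "is_pregnant" = true <;>
  by_cases hd : pvGetFlag profile "has_diabetes" = true <;>
  by_cases hk : pvGetFlag profile "has_kidney_disease" = true <;>
  (try rw [E0 ‹pvGetFlag profile "is_pregnant" = true›]) <;>
  (try rw [E1 ‹pvGetFlag profile "has_diabetes" = true›]) <;>
  (try rw [E2 ‹pvGetFlag profile "has_kidney_disease" = true›]) <;>
  simp only [hp, hd, hk, true_and, if_true] <;>
  (try clear E0 E1 E2) <;> (try clear h0) <;> (try clear h1) <;> (try clear h2) <;>
  (try generalize pvSel (List.foldl pvStep ([], [], []) med_names) 0 = F0) <;>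
  (try generalize pvSel (List.foldl pvStep ([], [], []) med_names) 1 = F1) <;>
  (try generalize pvSel (List.foldl pvStep ([], [], []) med_names) 2 = F2) <;>
  (try simp only [Bool.false_eq_true, false_and, if_false]) <;>
  split_ifs <;> rfl
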